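-- pv_equiv track=rewrite | github.com/lorenzo-arcioni/HPC-T-Annotator | fasta.py | get_multiple_strand_from_fasta
-- ===== SOURCE A (Python) =====
-- def get_multiple_strand_from_fasta(path: str):
-- 	'''
-- 	Takes in input the multifasta file, and after that takes each gene and add to a dict
-- 	the entry that has as key the name of the gene and as value the fasta string.
-- 	Arguments:
-- 	    path: str
-- 		the file path
-- 	Returns:
-- 	    ret: dict
-- 		The dictionary obtained
-- 	'''
--
-- 	last_header = None
--
-- 	ret = dict()
-- 	i = 0
--
-- 	lista = path.split("\n")
--
-- 	lista = list(filter(lambda a: a != "", lista))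
--
-- 	for line in lista:
-- 		# if the string start with '>' it's a new sequence
-- 		if line[0] == '>':
-- 			last_header = line[1:]
-- 			ret[last_header] = ""
-- 		# if the string don't start with '>' it's a slice of a sequence
-- 		else:
-- 			ret[last_header] += line.strip().upper()
-- 	return ret
-- ===== SOURCE B (Python) =====
-- def _blocks(ls):
--     # recursive grouping: header line + following sequence lines, then the rest
--     if not ls:
--         return []
--     header = ls[0]
--     j = 1
--     while j < len(ls) and ls[j][0] != '>':
--         j += 1
--     body = "".join(x.strip().upper() for x in ls[1:j])
--     return [(header[1:], body)] + _blocks(ls[j:])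
--
-- def get_multiple_strand_from_fasta(path: str):
--     lines = [l for l in path.split("\n") if l != ""]
--     ret = {}
--     for k, v in _blocks(lines):
--         ret[k] = v
--     return ret
-- ===== Notes on version B (the rewrite author's own statement) =====
-- stated objective: alternative
-- what changed: A threads a last_header state through one fold that mutates dict values line by line; B recursively splits the line list into (header, body) blocks, joins each body once, and writes the finished pairs into the dict.
import Mathlib
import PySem

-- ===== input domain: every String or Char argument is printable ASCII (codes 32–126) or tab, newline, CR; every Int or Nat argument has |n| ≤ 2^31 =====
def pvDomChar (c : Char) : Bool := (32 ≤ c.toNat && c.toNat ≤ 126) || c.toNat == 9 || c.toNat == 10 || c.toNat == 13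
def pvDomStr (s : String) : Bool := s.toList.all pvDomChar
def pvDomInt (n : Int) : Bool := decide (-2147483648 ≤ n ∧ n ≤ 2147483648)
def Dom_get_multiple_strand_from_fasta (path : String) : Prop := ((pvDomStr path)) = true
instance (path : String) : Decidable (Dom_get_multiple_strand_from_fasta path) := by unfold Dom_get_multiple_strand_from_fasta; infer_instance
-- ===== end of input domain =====

-- B replaces A's single stateful fold (last_header + in-place appends) by a recursive pass that
-- extracts (header, joined-sequence) blocks and then writes them into the dict; objective: alternative decomposition.

-- ===== PORT A =====
-- the for-loop of A: state = (last_header : Option String, ret : dict)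
def pvLoopA (lista : List String) (last : Option String) (ret : PySem.Dict String String) :
    PySem.Dict String String :=
  match lista with
  | [] => ret
  | line :: rest =>
    if PySem.Str.pyGet? line 0 = some '>' then
      pvLoopA rest (some (PySem.Str.slice line (some 1) none))
        (ret.insert (PySem.Str.slice line (some 1) none) "")
    else
      match last with
      | some h =>
          pvLoopA rest last (ret.insert h (ret.getD h "" ++ PySem.Str.upper (PySem.Str.strip line)))
      | none => ret  -- Python raises KeyError (ret[None]) here; excluded by Pre_

def get_multiple_strand_from_fasta (path : String) : List (String × String) :=
  let lista := ((PySem.Chars.splitOn path.toList "\n".toList).map String.ofList).filter (fun a => a ≠ "")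
  (pvLoopA lista none PySem.Dict.empty).items

-- ===== PORT B =====
-- _blocks of Source B: the while loop over j computes the maximal header-free prefix of ls[1:],
-- i.e. ls[1:j] = takeWhile (not header) and ls[j:] = dropWhile (not header).
def pvBlocks (ls : List String) : List (String × String) :=
  match ls with
  | [] => []
  | header :: rest =>
    (PySem.Str.slice header (some 1) none,
      PySem.Str.join ""
        ((rest.takeWhile (fun l => !(PySem.Str.pyGet? l 0 == some '>'))).map
          (fun x => PySem.Str.upper (PySem.Str.strip x))))
      :: pvBlocks (rest.dropWhile (fun l => !(PySem.Str.pyGet? l 0 == some '>')))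
termination_by ls.length
decreasing_by
  simpa using Nat.lt_succ_of_le (List.length_dropWhile_le _ rest)

def get_multiple_strand_from_fasta_alt (path : String) : List (String × String) :=
  let lines := ((PySem.Chars.splitOn path.toList "\n".toList).map String.ofList).filter (fun l => l ≠ "")
  ((pvBlocks lines).foldl (fun d kv => d.insert kv.1 kv.2) PySem.Dict.empty).items

-- ===== PRECONDITION & SPEC =====
-- Pre_ excludes exactly the inputs on which A raises KeyError: a non-empty line before the
-- first '>' header makes A execute ret[None] += …  (no header parsed yet).
def Pre_get_multiple_strand_from_fasta (path : String) : Prop :=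
  ∀ l ∈ (((PySem.Chars.splitOn path.toList "\n".toList).map String.ofList).filter (fun a => a ≠ "")).head?,
    PySem.Str.pyGet? l 0 = some '>'
instance (path : String) : Decidable (Pre_get_multiple_strand_from_fasta path) := by
  unfold Pre_get_multiple_strand_from_fasta; infer_instance

def pvWitness_get_multiple_strand_from_fasta : String := ">gene1\nacGT\ntt\n>gene2\nGG"

def Spec_get_multiple_strand_from_fasta (path : String) (out : List (String × String)) : Prop :=
  out = get_multiple_strand_from_fasta_alt path
instance (path : String) (out : List (String × String)) :
    Decidable (Spec_get_multiple_strand_from_fasta path out) := by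
  unfold Spec_get_multiple_strand_from_fasta; infer_instance

-- ===== CLAIM (what is proved, stated in full; the proofs are below) =====
def Claim_equal_get_multiple_strand_from_fasta : Prop :=
  ∀ (path : String), Dom_get_multiple_strand_from_fasta path →
    Pre_get_multiple_strand_from_fasta path →
    Spec_get_multiple_strand_from_fasta path (get_multiple_strand_from_fasta path)

-- ===== LEMMAS AND PROOFS =====
theorem pvWitness_ok :
    Dom_get_multiple_strand_from_fasta pvWitness_get_multiple_strand_from_fasta ∧
    Pre_get_multiple_strand_from_fasta pvWitness_get_multiple_strand_from_fasta := by
  decide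

theorem pvIntercalate_nil (xss : List (List Char)) :
    ([] : List Char).intercalate xss = xss.flatten := by
  simp [List.intercalate]
  induction xss with
  | nil => rfl
  | cons a t ih => cases t <;> simp_all [List.intersperse]

theorem pvJoin_nil : PySem.Str.join "" ([] : List String) = "" := rfl

theorem pvJoin_cons (x : String) (xs : List String) :
    PySem.Str.join "" (x :: xs) = x ++ PySem.Str.join "" xs := by
  simp [PySem.Str.join, PySem.Chars.join, pvIntercalate_nil, String.ofList_append,
    String.ofList_toList]

theorem pvHead_dropWhile {p : String → Bool} {l : List String} {x : String}
    (h : (l.dropWhile p).head? = some x) : p x = false := by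
  induction l with
  | nil => simp at h
  | cons a t ih =>
    rw [List.dropWhile_cons] at h
    split at h
    · exact ih h
    · simp_all

-- processing a header-free body under a current header h accumulates onto the value at h
theorem pvBody_step (body : List String) (rest : List String) (h : String)
    (d : PySem.Dict String String) (v : String)
    (hb : ∀ l ∈ body, ¬ (PySem.Str.pyGet? l 0 = some '>')) :
    pvLoopA (body ++ rest) (some h) (d.insert h v) =
      pvLoopA rest (some h)
        (d.insert h (v ++ PySem.Str.join ""
          (body.map (fun x => PySem.Str.upper (PySem.Str.strip x))))) := by
  induction body generalizing d v with
  | nil => simp only [List.nil_append, List.map_nil, pvJoin_nil, String.append_empty]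
  | cons line body ih =>
    have hl : ¬ (PySem.Str.pyGet? line 0 = some '>') := hb line (by simp)
    rw [List.cons_append, pvLoopA, if_neg hl]
    rw [PySem.Dict.getD_insert_self, PySem.Dict.insert_insert_self]
    rw [ih _ _ (fun l hm => hb l (by simp [hm]))]
    rw [List.map_cons, pvJoin_cons, String.append_assoc]

-- A's loop equals the fold of B's blocks, for a line list that is empty or starts with a header
theorem pvMain (n : Nat) (L : List String) (hn : L.length ≤ n)
    (hh : ∀ l ∈ L.head?, PySem.Str.pyGet? l 0 = some '>')
    (last : Option String) (d : PySem.Dict String String) :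
    pvLoopA L last d = (pvBlocks L).foldl (fun d kv => d.insert kv.1 kv.2) d := by
  induction n generalizing L last d with
  | zero =>
    have : L = [] := List.length_eq_zero_iff.mp (Nat.le_zero.mp hn)
    subst this; simp [pvLoopA, pvBlocks]
  | succ n ih =>
    match L with
    | [] => simp [pvLoopA, pvBlocks]
    | line :: rest =>
      have hline : PySem.Str.pyGet? line 0 = some '>' := hh line (by simp)
      rw [pvLoopA.eq_def]
      simp only []
      rw [if_pos hline, pvBlocks]
      set p : String → Bool := fun l => !(PySem.Str.pyGet? l 0 == some '>') with hp
      have hsplit : rest.takeWhile p ++ rest.dropWhile p = rest :=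
        List.takeWhile_append_dropWhile
      rw [← hsplit]
      rw [pvBody_step (rest.takeWhile p) (rest.dropWhile p) _ d ""
        (fun l hm => by
          have := List.mem_takeWhile_imp hm
          simp [hp] at this
          exact this)]
      rw [String.empty_append]
      rw [ih (rest.dropWhile p)
        (by
          have h1 : (rest.dropWhile p).length ≤ rest.length := List.length_dropWhile_le _ _
          have h2 : rest.length ≤ n := by
            simpa using Nat.le_of_succ_le_succ (by simpa using hn)
          omega)
        (fun l hm => by
          have := pvHead_dropWhile hm
          simp [hp] at this
          exact this)]
      simp

-- ===== VERDICT (by name: the statement is the Claim_ definition above) =====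
theorem get_multiple_strand_from_fasta_spec : Claim_equal_get_multiple_strand_from_fasta := by
  intro path _ hpre
  unfold Spec_get_multiple_strand_from_fasta get_multiple_strand_from_fasta
    get_multiple_strand_from_fasta_alt
  have := pvMain ((((PySem.Chars.splitOn path.toList "\n".toList).map String.ofList).filter (fun a => a ≠ "")).length)
    (((PySem.Chars.splitOn path.toList "\n".toList).map String.ofList).filter (fun a => a ≠ "")) le_rfl hpre none PySem.Dict.empty
  simp only [this]
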